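-- pv_equiv track=rewrite | github.com/AlgoBitConsulting/scatteringWaveletsNetwork | tableFinder.py | removeColsWithEntriesInNeighbour
-- ===== SOURCE A (Python) =====
-- def removeColsWithEntriesInNeighbour(LM, MK):
--    for jj in range(len(MK)):
--       r = MK[jj]
--       for kk in range(len(LM)):
--          lm  = LM[kk][0]
--          lmt = lm.copy()
--          for zz in range(len(lm)):
--             s = lm[zz]
--             if s[0] <= r <= s[2]:
--                lmt.remove(s)
--                LM[kk][0] = lmt
--
--    return(LM)
-- ===== SOURCE B (Python) =====
-- def _bisect_left(a, x):
--     lo, hi = 0, len(a)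
--     while lo < hi:
--         mid = (lo + hi) // 2
--         if a[mid] < x:
--             lo = mid + 1
--         else:
--             hi = mid
--     return lo
--
--
-- def _hit(ms, s):
--     # is there a value of ms inside [s[0], s[2]]?  ms is sorted
--     i = _bisect_left(ms, s[0])
--     return i < len(ms) and ms[i] <= s[2]
--
--
-- def removeColsWithEntriesInNeighbour(LM, MK):
--     if not MK:
--         return LM
--     ms = sorted(MK)
--     for row in LM:
--         row[0] = [s for s in row[0] if not _hit(ms, s)]
--     return LM
-- ===== Notes on version B (the rewrite author's own statement) =====
-- stated objective: faster
-- what changed: Instead of, for every MK value, rescanning every column and deleting matched entries with list.remove (a linear search each time), B sorts MK once and filters each column in a single pass, testing each entry's interval for a contained MK value by binary search.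
import Mathlib
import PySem

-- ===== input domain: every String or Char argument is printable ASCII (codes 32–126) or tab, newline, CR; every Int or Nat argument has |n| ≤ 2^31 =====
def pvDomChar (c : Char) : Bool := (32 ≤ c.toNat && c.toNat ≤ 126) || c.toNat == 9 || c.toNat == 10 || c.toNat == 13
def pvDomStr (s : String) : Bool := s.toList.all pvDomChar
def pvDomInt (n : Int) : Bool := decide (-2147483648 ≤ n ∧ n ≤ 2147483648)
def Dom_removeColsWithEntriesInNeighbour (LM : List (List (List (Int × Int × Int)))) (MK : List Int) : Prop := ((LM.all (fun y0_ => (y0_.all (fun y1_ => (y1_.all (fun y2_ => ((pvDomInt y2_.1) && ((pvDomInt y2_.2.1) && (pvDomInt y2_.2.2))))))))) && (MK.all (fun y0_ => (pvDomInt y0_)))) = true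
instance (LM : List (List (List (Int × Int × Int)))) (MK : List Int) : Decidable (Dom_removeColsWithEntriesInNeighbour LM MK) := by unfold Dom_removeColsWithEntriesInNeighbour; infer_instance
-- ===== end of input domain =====

-- ===== PORT A =====
-- A mutates LM in place (rebinding each row's first slot); B performs the same mutation, and
-- the equivalence proved here is about the return value.
def removeColsWithEntriesInNeighbour (LM : List (List (List (Int × Int × Int)))) (MK : List Int) : List (List (List (Int × Int × Int))) :=
  (PySem.List.pyRange 0 (PySem.List.len MK)).foldl (fun LM1 jj =>
    let r := PySem.List.pyGetD MK jj 0
    (PySem.List.pyRange 0 (PySem.List.len LM1)).foldl (fun LM2 kk =>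
      let row := PySem.List.pyGetD LM2 kk []
      let lm := PySem.List.pyGetD row 0 []
      let st := (PySem.List.pyRange 0 (PySem.List.len lm)).foldl
        (fun (st : List (Int × Int × Int) × List (List (List (Int × Int × Int)))) zz =>
          let s := PySem.List.pyGetD lm zz (0, 0, 0)
          if s.1 ≤ r ∧ r ≤ s.2.2 then
            let lmt' := (PySem.List.remove? st.1 s).getD st.1
            (lmt', PySem.List.pySetD st.2 kk (PySem.List.pySetD row 0 lmt'))
          else st) (lm, LM2)
      st.2) LM1) LM

-- ===== PORT B =====
-- hand-written binary search from Source B (_bisect_left), ported step for step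
def pvBisectLeft (a : List Int) (x : Int) (lo hi : Nat) : Nat :=
  if lo < hi then
    let mid := (lo + hi) / 2
    if a.getD mid 0 < x then pvBisectLeft a x (mid + 1) hi
    else pvBisectLeft a x lo mid
  else lo
termination_by hi - lo
decreasing_by all_goals omega

-- _hit from Source B: does sorted ms contain a value in [s[0], s[2]]?
def pvHit (ms : List Int) (s : Int × Int × Int) : Bool :=
  let i := pvBisectLeft ms s.1 0 ms.length
  decide (i < ms.length) && decide (ms.getD i 0 ≤ s.2.2)

def removeColsWithEntriesInNeighbour_alt (LM : List (List (List (Int × Int × Int)))) (MK : List Int) : List (List (List (Int × Int × Int))) :=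
  if MK.isEmpty then LM
  else
    let ms := PySem.List.sorted MK (fun x => x)
    LM.map (fun row =>
      PySem.List.pySetD row 0 ((PySem.List.pyGetD row 0 []).filter (fun s => !pvHit ms s)))

-- ===== PRECONDITION & SPEC =====
-- Pre_ is exactly A's return domain: with a nonempty MK, A evaluates LM[kk][0] for every kk and
-- raises IndexError on any empty LM[kk]; with MK empty the loop body never runs and A returns LM.
def Pre_removeColsWithEntriesInNeighbour (LM : List (List (List (Int × Int × Int)))) (MK : List Int) : Prop :=
  MK = [] ∨ ∀ row ∈ LM, row ≠ []
instance (LM : List (List (List (Int × Int × Int)))) (MK : List Int) : Decidable (Pre_removeColsWithEntriesInNeighbour LM MK) := by unfold Pre_removeColsWithEntriesInNeighbour; infer_instance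

def pvWitness_removeColsWithEntriesInNeighbour : (List (List (List (Int × Int × Int)))) × List Int :=
  ([[[(1, 0, 3)], []], [[(5, 0, 6), (2, 0, 2)]]], [2, 9])

def Spec_removeColsWithEntriesInNeighbour (LM : List (List (List (Int × Int × Int)))) (MK : List Int) (out : List (List (List (Int × Int × Int)))) : Prop := out = removeColsWithEntriesInNeighbour_alt LM MK
instance (LM : List (List (List (Int × Int × Int)))) (MK : List Int) (out : List (List (List (Int × Int × Int)))) : Decidable (Spec_removeColsWithEntriesInNeighbour LM MK out) := by unfold Spec_removeColsWithEntriesInNeighbour; infer_instance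

-- ===== CLAIM (what is proved, stated in full; the proofs are below) =====
def Claim_equal_removeColsWithEntriesInNeighbour : Prop := ∀ (LM : List (List (List (Int × Int × Int)))) (MK : List Int), Dom_removeColsWithEntriesInNeighbour LM MK → Pre_removeColsWithEntriesInNeighbour LM MK → Spec_removeColsWithEntriesInNeighbour LM MK (removeColsWithEntriesInNeighbour LM MK)

-- ===== LEMMAS AND PROOFS =====

theorem pvGetD_mono (a : List Int) (ha : a.Pairwise (· ≤ ·)) {i j : Nat}
    (hij : i ≤ j) (hj : j < a.length) : a.getD i 0 ≤ a.getD j 0 := by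
  rcases Nat.lt_or_ge i j with h | h
  · have := List.pairwise_iff_getElem.mp ha i j (by omega) hj h
    simpa [List.getD_eq_getElem?_getD, List.getElem?_eq_getElem, hj, show i < a.length by omega] using this
  · have : i = j := by omega
    subst this; rfl

theorem pvBL_lt (a : List Int) (x : Int) (ha : a.Pairwise (· ≤ ·)) :
    ∀ lo hi, hi ≤ a.length → ∀ j, lo ≤ j → j < pvBisectLeft a x lo hi → a.getD j 0 < x := by
  intro lo hi
  fun_induction pvBisectLeft a x lo hi with
  | case1 lo hi hlt mid hmid ih =>
    intro hhi j hj hlt2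
    rcases Nat.lt_or_ge ((lo + hi) / 2) j with h | h
    · exact ih hhi j (by omega) hlt2
    · calc a.getD j 0 ≤ a.getD ((lo + hi)/2) 0 := pvGetD_mono a ha h (by omega)
        _ < x := by simpa [mid] using hmid
  | case2 lo hi hlt mid hmid ih =>
    intro hhi j hj hlt2
    exact ih (by omega) j hj hlt2
  | case3 lo hi hlt => intro _ j hj hlt2; omega

theorem pvBL_ge (a : List Int) (x : Int) (ha : a.Pairwise (· ≤ ·)) :
    ∀ lo hi, hi ≤ a.length → ∀ j, pvBisectLeft a x lo hi ≤ j → j < hi → x ≤ a.getD j 0 := by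
  intro lo hi
  fun_induction pvBisectLeft a x lo hi with
  | case1 lo hi hlt mid hmid ih => intro hhi j hj hjhi; exact ih hhi j hj hjhi
  | case2 lo hi hlt mid hmid ih =>
    intro hhi j hj hjhi
    rcases Nat.lt_or_ge j ((lo + hi) / 2) with h | h
    · exact ih (by omega) j hj h
    · calc x ≤ a.getD ((lo + hi)/2) 0 := by simpa [mid] using not_lt.mp hmid
        _ ≤ a.getD j 0 := pvGetD_mono a ha h (by omega)
  | case3 lo hi hlt => intro _ j hj hjhi; omega

theorem pvHit_iff (ms : List Int) (hms : ms.Pairwise (· ≤ ·)) (s : Int × Int × Int) :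
    pvHit ms s = true ↔ ∃ r ∈ ms, s.1 ≤ r ∧ r ≤ s.2.2 := by
  unfold pvHit
  simp only [Bool.and_eq_true, decide_eq_true_eq]
  constructor
  · rintro ⟨hi, hle⟩
    refine ⟨ms.getD (pvBisectLeft ms s.1 0 ms.length) 0, ?_, ?_, hle⟩
    · simpa [List.getD_eq_getElem?_getD, List.getElem?_eq_getElem, hi] using List.getElem_mem hi
    · exact pvBL_ge ms s.1 hms 0 ms.length le_rfl _ le_rfl hi
  · rintro ⟨r, hr, h1, h2⟩
    obtain ⟨j, hj, rfl⟩ := List.getElem_of_mem hr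
    set i := pvBisectLeft ms s.1 0 ms.length with hidef
    have hij : i ≤ j := by
      by_contra h
      have := pvBL_lt ms s.1 hms 0 ms.length le_rfl j (Nat.zero_le _) (by omega)
      rw [List.getD_eq_getElem?_getD, List.getElem?_eq_getElem hj] at this
      simp at this; omega
    have hi : i < ms.length := by omega
    refine ⟨hi, ?_⟩
    calc ms.getD i 0 ≤ ms.getD j 0 := pvGetD_mono ms hms hij hj
      _ ≤ s.2.2 := by
        rw [List.getD_eq_getElem?_getD, List.getElem?_eq_getElem hj]; simpa using h2

theorem pvHit_any (MK : List Int) (s : Int × Int × Int) :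
    pvHit (PySem.List.sorted MK (fun x => x)) s
      = MK.any (fun r => decide (s.1 ≤ r ∧ r ≤ s.2.2)) := by
  have hp : (PySem.List.sorted MK (fun x => x)).Pairwise (· ≤ ·) :=
    PySem.List.sorted_pairwise MK (fun x => x)
  have hperm := PySem.List.sorted_perm (xs := MK) (key := fun x => x) (rev := false)
  rw [Bool.eq_iff_iff, pvHit_iff _ hp, List.any_eq_true]
  constructor
  · rintro ⟨r, hr, h1, h2⟩; exact ⟨r, hperm.mem_iff.mp hr, by simp [h1, h2]⟩
  · rintro ⟨r, hr, hrs⟩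
    simp only [decide_eq_true_eq] at hrs
    exact ⟨r, hperm.mem_iff.mpr hr, hrs⟩

-- the body of A's kk-loop, verbatim
def pvStep (r : Int) (LM2 : List (List (List (Int × Int × Int)))) (kk : Int) : List (List (List (Int × Int × Int))) :=
  let row := PySem.List.pyGetD LM2 kk []
  let lm := PySem.List.pyGetD row 0 []
  let st := (PySem.List.pyRange 0 (PySem.List.len lm)).foldl
    (fun (st : List (Int × Int × Int) × List (List (List (Int × Int × Int)))) zz =>
      let s := PySem.List.pyGetD lm zz (0, 0, 0)
      if s.1 ≤ r ∧ r ≤ s.2.2 then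
        let lmt' := (PySem.List.remove? st.1 s).getD st.1
        (lmt', PySem.List.pySetD st.2 kk (PySem.List.pySetD row 0 lmt'))
      else st) (lm, LM2)
  st.2

-- the net effect on one row: keep only entries whose interval misses r
def pvGG (r : Int) (row : List (List (Int × Int × Int))) : List (List (Int × Int × Int)) :=
  PySem.List.pySetD row 0 ((PySem.List.pyGetD row 0 []).filter (fun s => !decide (s.1 ≤ r ∧ r ≤ s.2.2)))

theorem pvA_as_foldl (LM : List (List (List (Int × Int × Int)))) (MK : List Int) :
    removeColsWithEntriesInNeighbour LM MK
      = MK.foldl (fun M r => (PySem.List.pyRange 0 (PySem.List.len M)).foldl (pvStep r) M) LM := by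
  have h := PySem.List.foldl_pyRange_pyGetD MK 0
    (fun M r => (PySem.List.pyRange 0 (PySem.List.len M)).foldl (pvStep r) M) LM (le_refl 0)
  simpa [removeColsWithEntriesInNeighbour, pvStep] using h

theorem pvInner (r kk : Int) (hk : 0 ≤ kk) (row : List (List (Int × Int × Int))) :
    ∀ (l2 pre : List (Int × Int × Int)) (M : List (List (List (Int × Int × Int)))),
      (∀ t ∈ pre, ¬(t.1 ≤ r ∧ r ≤ t.2.2)) →
      l2.foldl
        (fun (st : List (Int × Int × Int) × List (List (List (Int × Int × Int)))) s =>
          if s.1 ≤ r ∧ r ≤ s.2.2 then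
            ((PySem.List.remove? st.1 s).getD st.1,
             PySem.List.pySetD st.2 kk (PySem.List.pySetD row 0 ((PySem.List.remove? st.1 s).getD st.1)))
          else st) (pre ++ l2, M)
      = (pre ++ l2.filter (fun s => !decide (s.1 ≤ r ∧ r ≤ s.2.2)),
         if l2.any (fun s => decide (s.1 ≤ r ∧ r ≤ s.2.2))
         then PySem.List.pySetD M kk (PySem.List.pySetD row 0 (pre ++ l2.filter (fun s => !decide (s.1 ≤ r ∧ r ≤ s.2.2))))
         else M) := by
  intro l2
  induction l2 with
  | nil => intro pre M hpre; simp
  | cons s t ih =>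
    intro pre M hpre
    by_cases hs : s.1 ≤ r ∧ r ≤ s.2.2
    · have hnot : s ∉ pre := fun hmem => hpre s hmem hs
      have hrem : PySem.List.remove? (pre ++ s :: t) s = some (pre ++ t) := by
        rw [PySem.List.remove?_eq_some_erase _ s (by simp), List.erase_append_right _ hnot,
          List.erase_cons_head]
      rw [List.foldl_cons, if_pos hs, hrem]
      simp only [Option.getD_some]
      rw [ih pre _ hpre]
      have hfs : decide (s.1 ≤ r ∧ r ≤ s.2.2) = true := decide_eq_true hs
      have hcons : List.filter (fun s => !decide (s.1 ≤ r ∧ r ≤ s.2.2)) (s :: t)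
          = List.filter (fun s => !decide (s.1 ≤ r ∧ r ≤ s.2.2)) t := by
        simp [List.filter_cons, hs]
      have hanyc : ((s :: t).any fun s => decide (s.1 ≤ r ∧ r ≤ s.2.2)) = true := by
        simp [List.any_cons, hs]
      rw [hcons, hanyc, if_pos rfl, Prod.mk.injEq]
      refine ⟨rfl, ?_⟩
      by_cases ht : (t.any fun s => decide (s.1 ≤ r ∧ r ≤ s.2.2)) = true
      · rw [if_pos ht]
        simp only [PySem.List.pySetD_of_nonneg _ _ hk, List.set_set]
      · have hfilter : List.filter (fun s => !decide (s.1 ≤ r ∧ r ≤ s.2.2)) t = t := by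
          rw [List.filter_eq_self]
          intro a ha
          rw [List.any_eq_true] at ht
          simp only [Bool.not_eq_true', decide_eq_false_iff_not]
          intro hc
          exact ht ⟨a, ha, decide_eq_true hc⟩
        rw [if_neg ht, hfilter]
    · rw [List.foldl_cons, if_neg hs]
      have hsplit : pre ++ s :: t = (pre ++ [s]) ++ t := by simp
      have hpre' : ∀ a ∈ pre ++ [s], ¬(a.1 ≤ r ∧ r ≤ a.2.2) := by
        intro a ha
        rcases List.mem_append.mp ha with h | h
        · exact hpre a h
        · simp only [List.mem_singleton] at h; subst h; exact hs
      rw [hsplit, ih (pre ++ [s]) M hpre']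
      have hfs' : decide (s.1 ≤ r ∧ r ≤ s.2.2) = false := decide_eq_false hs
      have hor : r < s.1 ∨ s.2.2 < r := by
        rcases lt_or_ge r s.1 with h | h
        · exact Or.inl h
        · right; by_contra hc; exact hs ⟨h, not_lt.mp hc⟩
      simp [List.filter_cons, hfs', hor, List.any_cons]
      by_cases h : (t.any fun s => decide (s.1 ≤ r ∧ r ≤ s.2.2)) = true
      · rw [if_pos h, if_pos (by rw [h, Bool.or_true])]
      · have hcond : ¬ ((decide (s.1 ≤ r ∧ r ≤ s.2.2) || t.any fun s => decide (s.1 ≤ r ∧ r ≤ s.2.2)) = true) := by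
          rw [Bool.or_eq_true]
          rintro (hc | hc)
          · exact hs (of_decide_eq_true hc)
          · exact h hc
        rw [if_neg h, if_neg hcond]

theorem pvStep_eq (r kk : Int) (M : List (List (List (Int × Int × Int))))
    (hk : 0 ≤ kk) (hlen : kk.toNat < M.length)
    (hrow : PySem.List.pyGetD M kk [] ≠ []) :
    pvStep r M kk = PySem.List.pySetD M kk (pvGG r (PySem.List.pyGetD M kk [])) := by
  simp only [pvStep]
  set row := PySem.List.pyGetD M kk [] with hrowdef
  set lm := PySem.List.pyGetD row 0 [] with hlmdef
  have hconv := PySem.List.foldl_pyRange_pyGetD lm ((0 : Int), (0 : Int), (0 : Int))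
    (fun (st : List (Int × Int × Int) × List (List (List (Int × Int × Int)))) s =>
      if s.1 ≤ r ∧ r ≤ s.2.2 then
        ((PySem.List.remove? st.1 s).getD st.1,
         PySem.List.pySetD st.2 kk (PySem.List.pySetD row 0 ((PySem.List.remove? st.1 s).getD st.1)))
      else st) (lm, M) (le_refl 0)
  simp only [Int.toNat_zero, List.drop_zero] at hconv
  rw [hconv]
  have h := pvInner r kk hk row lm [] M (by intro t ht; simp at ht)
  simp only [List.nil_append] at h
  rw [h]
  by_cases hany : (lm.any fun s => decide (s.1 ≤ r ∧ r ≤ s.2.2)) = true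
  · rw [if_pos hany]; rfl
  · rw [if_neg hany]
    have hfilter : lm.filter (fun s => !decide (s.1 ≤ r ∧ r ≤ s.2.2)) = lm := by
      rw [List.filter_eq_self]
      intro a ha
      rw [List.any_eq_true] at hany
      simp only [Bool.not_eq_true', decide_eq_false_iff_not]
      exact fun hc => hany ⟨a, ha, decide_eq_true hc⟩
    unfold pvGG
    rw [← hlmdef, hfilter]
    obtain ⟨c, rest, hcr⟩ : ∃ c rest, row = c :: rest := by
      cases hrowval : row with
      | nil => exact absurd hrowval hrow
      | cons c rest => exact ⟨c, rest, rfl⟩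
    have hlm_c : lm = c := by rw [hlmdef, hcr]; simp [pysem]
    rw [hcr, hlm_c]
    have : PySem.List.pySetD (c :: rest) 0 c = c :: rest := by simp [pysem]
    rw [this, ← hcr, hrowdef]
    rw [PySem.List.pySetD_of_nonneg _ _ hk, PySem.List.pyGetD_of_nonneg _ _ hk,
      List.getD_eq_getElem?_getD, List.getElem?_eq_getElem hlen]
    simp [List.set_getElem_self]

theorem pvKK (r : Int) :
    ∀ (suf pre : List (List (List (Int × Int × Int)))),
      (∀ row ∈ pre ++ suf, row ≠ []) →
      (PySem.List.pyRange (pre.length : Int) ((pre.length + suf.length : Nat) : Int)).foldl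
        (pvStep r) (pre ++ suf)
      = pre ++ suf.map (pvGG r) := by
  intro suf
  induction suf with
  | nil =>
    intro pre h
    rw [PySem.List.pyRange_one_eq_nil (by simp)]
    simp
  | cons row suf ih =>
    intro pre h
    rw [PySem.List.pyRange_one_cons (by push_cast [List.length_cons]; omega), List.foldl_cons]
    have hrow : PySem.List.pyGetD (pre ++ row :: suf) (pre.length : Int) [] = row := by
      rw [PySem.List.pyGetD_of_nonneg _ _ (by positivity)]
      simp [List.getD_eq_getElem?_getD]
    have hstep : pvStep r (pre ++ row :: suf) (pre.length : Int)
        = pre ++ pvGG r row :: suf := by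
      rw [pvStep_eq r _ _ (by positivity) (by simp) (by rw [hrow]; exact h row (by simp))]
      rw [hrow, PySem.List.pySetD_of_nonneg _ _ (by positivity)]
      simp [List.set_append]
    rw [hstep]
    have hlen : pvGG r row ≠ [] := by
      have hrne := h row (by simp)
      unfold pvGG
      rw [PySem.List.pySetD_of_nonneg _ _ (by norm_num)]
      intro hc
      apply hrne
      have hlc := congrArg List.length hc
      simp only [List.length_set, List.length_nil] at hlc
      exact List.eq_nil_of_length_eq_zero hlc
    have ih2 := ih (pre ++ [pvGG r row]) (by
      intro a ha
      rcases List.mem_append.mp ha with h1 | h1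
      · rcases List.mem_append.mp h1 with h2 | h2
        · exact h a (by simp [h2])
        · simp only [List.mem_singleton] at h2; subst h2; exact hlen
      · exact h a (by simp [h1]))
    simp only [List.append_assoc, List.singleton_append, List.length_append,
      List.length_singleton, List.length_cons, List.map_cons] at ih2 ⊢
    convert ih2 using 3 <;> push_cast [List.length_nil] <;> ring

theorem pvOuter :
    ∀ (mk : List Int) (M : List (List (List (Int × Int × Int)))),
      (∀ row ∈ M, row ≠ []) →
      mk.foldl (fun M2 r => (PySem.List.pyRange 0 (PySem.List.len M2)).foldl (pvStep r) M2) M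
      = M.map (fun row =>
          PySem.List.pySetD row 0 ((PySem.List.pyGetD row 0 []).filter
            (fun s => !mk.any (fun r => decide (s.1 ≤ r ∧ r ≤ s.2.2))))) := by
  intro mk
  induction mk with
  | nil =>
    intro M h
    rw [List.foldl_nil]
    conv_lhs => rw [← List.map_id M]
    symm
    apply List.map_congr_left
    intro row hrow
    show _ = id row
    obtain ⟨c, rest, rfl⟩ : ∃ c rest, row = c :: rest := by
      cases hv : row with
      | nil => exact absurd hv (h row hrow)
      | cons c rest => exact ⟨c, rest, rfl⟩
    simp [pysem]
  | cons r t ih =>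
    intro M h
    rw [List.foldl_cons]
    have hkk := pvKK r M []
    simp only [List.nil_append, List.length_nil, Nat.zero_add, Nat.cast_zero] at hkk
    have hlenM : PySem.List.len M = ((M.length : Nat) : Int) := rfl
    rw [hlenM, hkk h]
    have hne : ∀ row ∈ M.map (pvGG r), row ≠ [] := by
      intro a ha
      rw [List.mem_map] at ha
      obtain ⟨row, hrow, rfl⟩ := ha
      have hrne := h row hrow
      unfold pvGG
      rw [PySem.List.pySetD_of_nonneg _ _ (by norm_num)]
      intro hc
      apply hrne
      have hlc := congrArg List.length hc
      simp only [List.length_set, List.length_nil] at hlc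
      exact List.eq_nil_of_length_eq_zero hlc
    rw [ih _ hne, List.map_map]
    apply List.map_congr_left
    intro row hrow
    obtain ⟨c, rest, rfl⟩ : ∃ c rest, row = c :: rest := by
      cases hv : row with
      | nil => exact absurd hv (h row hrow)
      | cons c rest => exact ⟨c, rest, rfl⟩
    simp only [Function.comp_apply, pvGG]
    have h0 : ∀ (v : List (Int × Int × Int)), PySem.List.pySetD (c :: rest) (0 : Int) v = v :: rest := by
      intro v; simp [pysem]
    have hg : PySem.List.pyGetD (c :: rest) (0 : Int) [] = c := by simp [pysem]
    rw [hg, h0]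
    have hg2 : PySem.List.pyGetD ((List.filter (fun s => !decide (s.1 ≤ r ∧ r ≤ s.2.2)) c) :: rest) (0 : Int) []
        = List.filter (fun s => !decide (s.1 ≤ r ∧ r ≤ s.2.2)) c := by simp [pysem]
    have h0' : ∀ (v : List (Int × Int × Int)), PySem.List.pySetD ((List.filter (fun s => !decide (s.1 ≤ r ∧ r ≤ s.2.2)) c) :: rest) (0 : Int) v = v :: rest := by
      intro v; simp [pysem]
    rw [hg2, h0', List.filter_filter, h0]
    congr 1
    apply List.filter_congr
    intro s _
    simp [List.any_cons, Bool.not_or, Bool.and_comm]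


theorem pvMain (LM : List (List (List (Int × Int × Int)))) (MK : List Int)
    (hpre : MK = [] ∨ ∀ row ∈ LM, row ≠ []) :
    removeColsWithEntriesInNeighbour LM MK = removeColsWithEntriesInNeighbour_alt LM MK := by
  by_cases hmk : MK = []
  · subst hmk
    unfold removeColsWithEntriesInNeighbour removeColsWithEntriesInNeighbour_alt
    rw [show PySem.List.len ([] : List Int) = 0 from rfl,
      PySem.List.pyRange_one_eq_nil le_rfl, List.foldl_nil]
    simp
  · have hrows : ∀ row ∈ LM, row ≠ [] := hpre.resolve_left hmk
    rw [pvA_as_foldl, pvOuter MK LM hrows]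
    unfold removeColsWithEntriesInNeighbour_alt
    rw [if_neg (by simp [hmk])]
    apply List.map_congr_left
    intro row hrow
    congr 1
    apply List.filter_congr
    intro s _
    rw [pvHit_any]

-- ===== VERDICT (by name: the statement is the Claim_ definition above) =====
theorem removeColsWithEntriesInNeighbour_spec : Claim_equal_removeColsWithEntriesInNeighbour := by
  intro LM MK _ hpre
  unfold Spec_removeColsWithEntriesInNeighbour
  exact pvMain LM MK hpre
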